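-- pv_equiv track=rewrite | github.com/jomag/advent-of-code | 2024/day2/day2.py | part2
-- ===== SOURCE A (Python) =====
-- def part2(data):
--     def test_line(line):
--         def is_increasing(line):
--             for n in range(len(line) - 1):
--                 p, pp = line[n], line[n + 1]
--                 if p >= pp or pp - p > 3:
--                     return False
--             return True
--
--         def is_increasing_or_decreasing(line):
--             return is_increasing(line) or is_increasing(list(reversed(line)))
--
--         if is_increasing_or_decreasing(line):
--             return True
--
--         for i in range(len(line)):
--             if is_increasing_or_decreasing(line[:i] + line[(i + 1) :]):
--                 return True
--
--         return False
--
--     return sum([test_line(line) for line in data])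
-- ===== SOURCE B (Python) =====
-- def part2(data):
--     def ok(a, b):
--         return 1 <= b - a <= 3
--
--     def first_bad(line):
--         for i in range(len(line) - 1):
--             if not ok(line[i], line[i + 1]):
--                 return i
--         return None
--
--     def safe(line):
--         return all(ok(a, b) for a, b in zip(line, line[1:]))
--
--     def damp(line):
--         i = first_bad(line)
--         if i is None:
--             return True
--         return safe(line[:i] + line[i + 1:]) or safe(line[:i + 1] + line[i + 2:])
--
--     def test(line):
--         return damp(line) or damp(line[::-1])
--
--     return sum(test(line) for line in data)
-- ===== Notes on version B (the rewrite author's own statement) =====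
-- stated objective: faster
-- what changed: Instead of re-testing every one-element-removed copy of each report (quadratic per report), B finds the first adjacent violation in a single scan and only tests the two removals (left/right element of that pair) that can possibly repair it, for each direction.
import Mathlib
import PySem

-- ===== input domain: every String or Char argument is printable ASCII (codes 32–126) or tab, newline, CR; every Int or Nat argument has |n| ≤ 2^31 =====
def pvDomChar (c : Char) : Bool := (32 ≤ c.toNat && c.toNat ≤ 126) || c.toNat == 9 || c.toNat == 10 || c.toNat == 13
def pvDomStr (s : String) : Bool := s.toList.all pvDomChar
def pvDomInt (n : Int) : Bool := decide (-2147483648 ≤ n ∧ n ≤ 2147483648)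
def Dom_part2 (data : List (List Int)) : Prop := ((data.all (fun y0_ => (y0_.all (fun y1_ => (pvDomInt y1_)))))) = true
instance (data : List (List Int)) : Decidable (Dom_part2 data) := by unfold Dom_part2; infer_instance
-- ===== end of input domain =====

-- B replaces A's try-every-removal quadratic scan per report by a single scan that locates the
-- first adjacent violation and tests only the two removals that can repair it (per direction).

-- ===== PORT A =====
-- is_increasing: walk adjacent pairs, fail on the first bad one
def incA : List Int → Bool
  | p :: pp :: rest => if p ≥ pp || pp - p > 3 then false else incA (pp :: rest)
  | _ => true

-- is_increasing_or_decreasing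
def iodA (line : List Int) : Bool := incA line || incA line.reverse

-- test_line: as-is, else try every single-element removal (line[:i] + line[i+1:])
def testA (line : List Int) : Bool :=
  if iodA line then true
  else (List.range line.length).any (fun i => iodA (line.take i ++ line.drop (i + 1)))

def part2 (data : List (List Int)) : Int :=
  data.foldl (fun acc line => acc + (if testA line then 1 else 0)) 0

-- ===== PORT B =====
def okB (a b : Int) : Bool := decide (1 ≤ b - a ∧ b - a ≤ 3)

-- safe: all adjacent pairs ok
def incB : List Int → Bool
  | a :: b :: r => okB a b && incB (b :: r)
  | _ => true

-- first_bad: index of the first violating adjacent pair, if any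
def firstBad : List Int → Option Nat
  | a :: b :: r => if okB a b then (firstBad (b :: r)).map (· + 1) else some 0
  | _ => none

-- damp: safe, or repairable by dropping one endpoint of the first violation
def dampB (line : List Int) : Bool :=
  match firstBad line with
  | none => true
  | some i => incB (line.eraseIdx i) || incB (line.eraseIdx (i + 1))

def testB (line : List Int) : Bool := dampB line || dampB line.reverse

def part2_alt (data : List (List Int)) : Int :=
  data.foldl (fun acc line => acc + (if testB line then 1 else 0)) 0

-- ===== PRECONDITION & SPEC =====
def Spec_part2 (data : List (List Int)) (out : Int) : Prop := out = part2_alt data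
instance (data : List (List Int)) (out : Int) : Decidable (Spec_part2 data out) := by unfold Spec_part2; infer_instance

-- ===== CLAIM (what is proved, stated in full; the proofs are below) =====
def Claim_equal_part2 : Prop := ∀ (data : List (List Int)), Dom_part2 data → Spec_part2 data (part2 data)

-- ===== LEMMAS AND PROOFS =====

-- "safe or some single removal is safe", the brute-force characterisation both tests reduce to
def dampAll (line : List Int) : Bool :=
  incB line || (List.range line.length).any (fun i => incB (line.eraseIdx i))

theorem incA_eq_incB (l : List Int) : incA l = incB l := by
  match l with
  | [] => rfl
  | [a] => rfl
  | a :: b :: r =>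
    rw [show incA (a :: b :: r) = if a ≥ b || b - a > 3 then false else incA (b :: r) from rfl,
        show incB (a :: b :: r) = (okB a b && incB (b :: r)) from rfl,
        incA_eq_incB (b :: r)]
    by_cases h : 1 ≤ b - a ∧ b - a ≤ 3
    · have hc : (a ≥ b || b - a > 3) = false := by
        simp only [Bool.or_eq_false_iff, decide_eq_false_iff_not]; omega
      simp [hc, okB, h]
    · have hc : (a ≥ b || b - a > 3) = true := by
        simp only [Bool.or_eq_true, decide_eq_true_eq]; omega
      have hok : okB a b = false := by
        simp only [okB, decide_eq_false_iff_not]; exact h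
      simp [hc, hok]

theorem firstBad_none (l : List Int) (h : firstBad l = none) : incB l = true := by
  match l with
  | [] => rfl
  | [a] => rfl
  | a :: b :: r =>
    rw [show firstBad (a :: b :: r)
        = (if okB a b then (firstBad (b :: r)).map (· + 1) else some 0) from rfl] at h
    by_cases hab : okB a b = true
    · rw [if_pos hab, Option.map_eq_none_iff] at h
      rw [show incB (a :: b :: r) = (okB a b && incB (b :: r)) from rfl, hab,
          firstBad_none (b :: r) h]
      rfl
    · rw [if_neg hab] at h; cases h

theorem firstBad_some_lt (l : List Int) (i : Nat) (h : firstBad l = some i) :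
    i + 1 < l.length := by
  match l with
  | [] => cases h
  | [a] => cases h
  | a :: b :: r =>
    rw [show firstBad (a :: b :: r)
        = (if okB a b then (firstBad (b :: r)).map (· + 1) else some 0) from rfl] at h
    by_cases hab : okB a b = true
    · rw [if_pos hab, Option.map_eq_some_iff] at h
      obtain ⟨j, hj, rfl⟩ := h
      have := firstBad_some_lt (b :: r) j hj
      simp only [List.length_cons] at *
      omega
    · rw [if_neg hab] at h
      cases h
      simp only [List.length_cons]; omega

theorem incB_of_cons (a : Int) (t : List Int) (h : incB (a :: t) = true) : incB t = true := by
  match t with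
  | [] => rfl
  | b :: r =>
    rw [show incB (a :: b :: r) = (okB a b && incB (b :: r)) from rfl,
        Bool.and_eq_true] at h
    exact h.2

theorem incB_cons_false (a : Int) (t : List Int) (h : incB t = false) :
    incB (a :: t) = false := by
  cases hc : incB (a :: t) with
  | false => rfl
  | true => rw [incB_of_cons a t hc] at h; cases h

theorem firstBad_some_incB (l : List Int) (i : Nat) (h : firstBad l = some i) :
    incB l = false := by
  match l with
  | [] => cases h
  | [a] => cases h
  | a :: b :: r =>
    rw [show firstBad (a :: b :: r)
        = (if okB a b then (firstBad (b :: r)).map (· + 1) else some 0) from rfl] at h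
    rw [show incB (a :: b :: r) = (okB a b && incB (b :: r)) from rfl]
    by_cases hab : okB a b = true
    · rw [if_pos hab, Option.map_eq_some_iff] at h
      obtain ⟨j, hj, rfl⟩ := h
      rw [firstBad_some_incB (b :: r) j hj, Bool.and_false]
    · rw [Bool.eq_false_iff.mpr hab, Bool.false_and]

theorem firstBad_some_erase (l : List Int) (i j : Nat) (h : firstBad l = some i)
    (h1 : j ≠ i) (h2 : j ≠ i + 1) : incB (l.eraseIdx j) = false := by
  match l with
  | [] => cases h
  | [a] => cases h
  | a :: b :: r =>
    rw [show firstBad (a :: b :: r)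
        = (if okB a b then (firstBad (b :: r)).map (· + 1) else some 0) from rfl] at h
    by_cases hab : okB a b = true
    · rw [if_pos hab, Option.map_eq_some_iff] at h
      obtain ⟨i', hi', rfl⟩ := h
      match j with
      | 0 =>
        rw [show (a :: b :: r).eraseIdx 0 = b :: r from rfl]
        exact firstBad_some_incB (b :: r) i' hi'
      | k + 1 =>
        rw [show (a :: b :: r).eraseIdx (k + 1) = a :: (b :: r).eraseIdx k from rfl]
        exact incB_cons_false _ _
          (firstBad_some_erase (b :: r) i' k hi' (by omega) (by omega))
    · rw [if_neg hab] at h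
      cases h
      match j, h1, h2 with
      | k + 2, _, _ =>
        rw [show (a :: b :: r).eraseIdx (k + 2) = a :: b :: r.eraseIdx k from rfl,
            show incB (a :: b :: r.eraseIdx k) = (okB a b && incB (b :: r.eraseIdx k)) from rfl,
            Bool.eq_false_iff.mpr hab, Bool.false_and]

theorem dampB_eq_dampAll (l : List Int) : dampB l = dampAll l := by
  unfold dampB dampAll
  cases h : firstBad l with
  | none => simp [firstBad_none l h]
  | some i =>
    have hlen := firstBad_some_lt l i h
    rw [firstBad_some_incB l i h, Bool.false_or]
    refine Bool.eq_iff_iff.mpr ?_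
    simp only [List.any_eq_true, List.mem_range, Bool.or_eq_true]
    constructor
    · rintro (h1 | h1)
      · exact ⟨i, by omega, h1⟩
      · exact ⟨i + 1, by omega, h1⟩
    · rintro ⟨j, hj, hS⟩
      by_cases e1 : j = i
      · subst e1; exact Or.inl hS
      by_cases e2 : j = i + 1
      · subst e2; exact Or.inr hS
      · rw [firstBad_some_erase l i j h e1 e2] at hS; cases hS

theorem any_or_split {α : Type} (l : List α) (f g : α → Bool) :
    (l.any fun x => f x || g x) = (l.any f || l.any g) := by
  induction l with
  | nil => rfl
  | cons a t ih =>
    simp only [List.any_cons, ih]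
    cases f a <;> cases g a <;> cases t.any f <;> cases t.any g <;> rfl

theorem any_congr_mem {α : Type} (l : List α) (f g : α → Bool)
    (h : ∀ x ∈ l, f x = g x) : l.any f = l.any g := by
  induction l with
  | nil => rfl
  | cons a t ih =>
    simp only [List.any_cons, h a (by simp),
      ih (fun x hx => h x (List.mem_cons_of_mem a hx))]

theorem any_range_flip (n : Nat) (f : Nat → Bool) :
    (List.range n).any (fun i => f (n - 1 - i)) = (List.range n).any f := by
  refine Bool.eq_iff_iff.mpr ?_
  simp only [List.any_eq_true, List.mem_range]
  constructor
  · rintro ⟨i, hi, hf⟩; exact ⟨n - 1 - i, by omega, hf⟩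
  · rintro ⟨i, hi, hf⟩
    exact ⟨n - 1 - i, by omega, by rw [show n - 1 - (n - 1 - i) = i by omega]; exact hf⟩

theorem rev_eraseIdx (l : List Int) (i : Nat) (h : i < l.length) :
    (l.eraseIdx i).reverse = l.reverse.eraseIdx (l.length - 1 - i) := by
  match l, i with
  | a :: t, 0 =>
    rw [show (a :: t).eraseIdx 0 = t from rfl, List.reverse_cons,
        show (a :: t).length - 1 - 0 = t.reverse.length by simp,
        List.eraseIdx_append_of_length_le (Nat.le_refl _)]
    simp
  | a :: t, i + 1 =>
    have ht : i < t.length := by simpa using h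
    rw [show (a :: t).eraseIdx (i + 1) = a :: t.eraseIdx i from rfl, List.reverse_cons,
        rev_eraseIdx t i ht, List.reverse_cons,
        show (a :: t).length - 1 - (i + 1) = t.length - 1 - i by
          simp only [List.length_cons]; omega,
        List.eraseIdx_append_of_lt_length (by rw [List.length_reverse]; omega)]

theorem testA_eq_testB (l : List Int) : testA l = testB l := by
  unfold testA testB
  rw [dampB_eq_dampAll, dampB_eq_dampAll]
  have hiod : ∀ m : List Int, iodA m = (incB m || incB m.reverse) := by
    intro m; unfold iodA; rw [incA_eq_incB, incA_eq_incB]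
  cases hc : (incB l || incB l.reverse) with
  | true =>
    rw [hiod l] at *
    rw [hc, if_pos rfl]
    unfold dampAll
    rcases Bool.or_eq_true .. |>.mp hc with h1 | h1
    · rw [h1]; rfl
    · rw [h1]; cases incB l <;> cases ((List.range l.reverse.length).any _) <;> simp
  | false =>
    rw [hiod l, hc, if_neg (by simp)]
    have step : ∀ i ∈ List.range l.length,
        iodA (l.take i ++ l.drop (i + 1))
          = (incB (l.eraseIdx i) || incB (l.reverse.eraseIdx (l.length - 1 - i))) := by
      intro i hi
      rw [List.mem_range] at hi
      rw [hiod, ← List.eraseIdx_eq_take_drop_succ, rev_eraseIdx l i hi]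
    rw [any_congr_mem _ _ _ step, any_or_split]
    rw [any_range_flip l.length (fun j => incB (l.reverse.eraseIdx j))]
    unfold dampAll
    rw [List.length_reverse]
    rcases Bool.or_eq_false_iff.mp hc with ⟨h1, h2⟩
    rw [h1, h2, Bool.false_or, Bool.false_or]

theorem fold_eq (data : List (List Int)) (acc : Int) :
    data.foldl (fun acc line => acc + (if testA line then 1 else 0)) acc
      = data.foldl (fun acc line => acc + (if testB line then 1 else 0)) acc := by
  induction data generalizing acc with
  | nil => rfl
  | cons l t ih => simp only [List.foldl_cons, testA_eq_testB]

-- ===== VERDICT (by name: the statement is the Claim_ definition above) =====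
theorem part2_spec : Claim_equal_part2 := by
  intro data _
  unfold Spec_part2 part2 part2_alt
  exact fold_eq data 0
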